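-- pv_equiv track=rewrite | github.com/CrispyChillies/Image-Retrieval---Thesis-2026 | ChestMIR/milvus_embed.py | _compact_label_text
-- ===== SOURCE A (Python) =====
-- def _compact_label_text(labels: list[str], max_len: int = 120) -> str:
--     if not labels:
--         return "No finding"
--
--     chosen: list[str] = []
--     for label in labels:
--         candidate = ", ".join(chosen + [label]) if chosen else label
--         if len(candidate) > max_len:
--             break
--         chosen.append(label)
--
--     if not chosen:
--         return labels[0][:max_len]
--
--     remaining = len(labels) - len(chosen)
--     if remaining <= 0:
--         return ", ".join(chosen)
--
--     suffix = f" (+{remaining} more)"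
--     base = ", ".join(chosen)
--     if len(base) + len(suffix) <= max_len:
--         return f"{base}{suffix}"
--
--     trimmed_base = base[: max(0, max_len - len(suffix))].rstrip(", ")
--     return f"{trimmed_base}{suffix}"
-- ===== SOURCE B (Python) =====
-- def _compact_label_text(labels: list[str], max_len: int = 120) -> str:
--     if not labels:
--         return "No finding"
--
--     # cumulative table: pref[k] = len(", ".join(labels[:k+1])) + 2
--     pref = []
--     total = 0
--     for label in labels:
--         total += len(label) + 2
--         pref.append(total)
--
--     # binary search for the largest c with len(", ".join(labels[:c])) <= max_len
--     x = max_len + 2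
--     lo, hi = 0, len(pref)
--     while lo < hi:
--         mid = (lo + hi) // 2
--         if x < pref[mid]:
--             hi = mid
--         else:
--             lo = mid + 1
--     chosen = labels[:lo]
--
--     if not chosen:
--         return labels[0][:max_len]
--
--     remaining = len(labels) - lo
--     if remaining <= 0:
--         return ", ".join(chosen)
--
--     suffix = f" (+{remaining} more)"
--     base = ", ".join(chosen)
--     if len(base) + len(suffix) <= max_len:
--         return f"{base}{suffix}"
--
--     trimmed_base = base[: max(0, max_len - len(suffix))].rstrip(", ")
--     return f"{trimmed_base}{suffix}"
-- ===== Notes on version B (the rewrite author's own statement) =====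
-- stated objective: faster
-- what changed: Replaced the greedy loop that re-joins the growing prefix on every iteration with a cumulative-length table built in one pass plus a hand-written binary search for the cutoff count.
import Mathlib
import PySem

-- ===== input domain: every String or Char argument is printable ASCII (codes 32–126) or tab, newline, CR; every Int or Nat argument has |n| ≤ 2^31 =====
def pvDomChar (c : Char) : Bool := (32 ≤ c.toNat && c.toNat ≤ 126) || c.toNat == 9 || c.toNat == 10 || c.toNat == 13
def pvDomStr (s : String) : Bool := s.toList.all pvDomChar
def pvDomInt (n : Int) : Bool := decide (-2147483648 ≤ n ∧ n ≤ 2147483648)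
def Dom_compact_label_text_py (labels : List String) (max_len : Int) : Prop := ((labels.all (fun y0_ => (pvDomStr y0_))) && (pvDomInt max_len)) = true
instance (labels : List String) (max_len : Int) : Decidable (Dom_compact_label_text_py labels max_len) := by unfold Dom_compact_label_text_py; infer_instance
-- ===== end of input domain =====

-- B replaces A's quadratic re-join greedy loop by a one-pass cumulative-length table plus binary search for the cutoff (faster).


-- shared helper: hand port of Python s.rstrip(", ") (drop trailing ',' and ' '); exact for this char set
def pvRstripCommaSpace (s : String) : String :=
  String.ofList ((s.toList.reverse.dropWhile (fun c => c == ',' || c == ' ')).reverse)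

-- ===== PORT A =====
-- A's greedy loop: chosen grows while the re-built join stays within max_len
def pvLoopA (max_len : Int) : List String → List String → List String
  | chosen, [] => chosen
  | chosen, label :: rest =>
    let candidate := if chosen ≠ [] then PySem.Str.join ", " (chosen ++ [label]) else label
    if max_len < PySem.Str.len candidate then chosen
    else pvLoopA max_len (chosen ++ [label]) rest

def compact_label_text_py (labels : List String) (max_len : Int) : String :=
  if labels = [] then "No finding" else
  let chosen := pvLoopA max_len [] labels
  if chosen = [] then PySem.Str.slice (labels.headD "") none (some max_len) else
  let remaining : Int := (labels.length : Int) - (chosen.length : Int)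
  if remaining ≤ 0 then PySem.Str.join ", " chosen else
  let suffix := " (+" ++ PySem.Int.toStr remaining ++ " more)"
  let base := PySem.Str.join ", " chosen
  if PySem.Str.len base + PySem.Str.len suffix ≤ max_len then base ++ suffix else
  pvRstripCommaSpace (PySem.Str.slice base none (some (max 0 (max_len - PySem.Str.len suffix)))) ++ " (+" ++ PySem.Int.toStr remaining ++ " more)"

-- ===== PORT B =====
-- cumulative table: (pvPref t ls)[k] = t + len(", ".join(ls[:k+1])) + 2
def pvPref (total : Int) : List String → List Int
  | [] => []
  | l :: ls => (total + PySem.Str.len l + 2) :: pvPref (total + PySem.Str.len l + 2) ls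

-- hand-written binary search of Source B (first index whose table entry exceeds x); pref[mid] is always in range, getD 0 is a dummy
def pvBisect (pref : List Int) (x : Int) (lo hi : Nat) : Nat :=
  if lo < hi then
    let mid := (lo + hi) / 2
    if x < pref.getD mid 0 then pvBisect pref x lo mid else pvBisect pref x (mid + 1) hi
  else lo
termination_by hi - lo

def compact_label_text_py_alt (labels : List String) (max_len : Int) : String :=
  if labels = [] then "No finding" else
  let pref := pvPref 0 labels
  let c := pvBisect pref (max_len + 2) 0 pref.length
  let chosen := labels.take c
  if chosen = [] then PySem.Str.slice (labels.headD "") none (some max_len) else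
  let remaining : Int := (labels.length : Int) - (c : Int)
  if remaining ≤ 0 then PySem.Str.join ", " chosen else
  let suffix := " (+" ++ PySem.Int.toStr remaining ++ " more)"
  let base := PySem.Str.join ", " chosen
  if PySem.Str.len base + PySem.Str.len suffix ≤ max_len then base ++ suffix else
  pvRstripCommaSpace (PySem.Str.slice base none (some (max 0 (max_len - PySem.Str.len suffix)))) ++ " (+" ++ PySem.Int.toStr remaining ++ " more)"

-- ===== PRECONDITION & SPEC =====
def Spec_compact_label_text_py (labels : List String) (max_len : Int) (out : String) : Prop := out = compact_label_text_py_alt labels max_len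
instance (labels : List String) (max_len : Int) (out : String) : Decidable (Spec_compact_label_text_py labels max_len out) := by unfold Spec_compact_label_text_py; infer_instance

-- ===== CLAIM (what is proved, stated in full; the proofs are below) =====
def Claim_equal_compact_label_text_py : Prop := ∀ (labels : List String) (max_len : Int), Dom_compact_label_text_py labels max_len → Spec_compact_label_text_py labels max_len (compact_label_text_py labels max_len)

-- ===== LEMMAS AND PROOFS =====

theorem pvPref_length (t : Int) (ls : List String) : (pvPref t ls).length = ls.length := by
  induction ls generalizing t with
  | nil => rfl
  | cons l ls ih => simp [pvPref, ih]

theorem len_join_singleton (l : String) : PySem.Str.len (PySem.Str.join ", " [l]) = PySem.Str.len l := by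
  simp [PySem.Str.len_eq, PySem.Str.toList_join, PySem.Chars.join_singleton]

theorem str_len_nonneg (s : String) : 0 ≤ PySem.Str.len s := by
  simp [PySem.Str.len_eq]

theorem len_join_cons (l : String) (ls : List String) (h : ls ≠ []) :
    PySem.Str.len (PySem.Str.join ", " (l :: ls)) = PySem.Str.len l + 2 + PySem.Str.len (PySem.Str.join ", " ls) := by
  cases ls with
  | nil => exact absurd rfl h
  | cons b bs =>
    simp [PySem.Str.len_eq, PySem.Str.toList_join, PySem.Chars.join_cons_cons]
    ring

theorem pvPref_getD (ls : List String) : ∀ (t : Int) (k : Nat), k < ls.length →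
    (pvPref t ls).getD k 0 = t + PySem.Str.len (PySem.Str.join ", " (ls.take (k + 1))) + 2 := by
  induction ls with
  | nil => intro t k hk; simp at hk
  | cons l ls ih =>
    intro t k hk
    cases k with
    | zero => simp [pvPref]
    | succ k =>
      simp only [List.length_cons, Nat.succ_lt_succ_iff] at hk
      have h1 : ls.take (k + 1) ≠ [] := by
        have : (ls.take (k + 1)).length = k + 1 := by
          rw [List.length_take]; omega
        intro h; rw [h] at this; simp at this
      simp only [pvPref, List.getD, List.getElem?_cons_succ]
      have := ih (t + PySem.Str.len l + 2) k hk
      simp only [List.getD] at this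
      rw [this, List.take_succ_cons, len_join_cons l _ h1]
      ring

theorem pvPref_mono (ls : List String) : ∀ (t : Int) (i j : Nat), i ≤ j → j < ls.length →
    (pvPref t ls).getD i 0 ≤ (pvPref t ls).getD j 0 := by
  intro t i j hij hj
  rcases Nat.lt_or_ge i ls.length with hi | hi
  · rw [pvPref_getD ls t i hi, pvPref_getD ls t j hj]
    -- length of the join is monotone in the number of labels joined
    have key : ∀ (m d : Nat), m + d ≤ ls.length → m ≥ 1 →
        PySem.Str.len (PySem.Str.join ", " (ls.take m)) ≤ PySem.Str.len (PySem.Str.join ", " (ls.take (m + d))) := by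
      intro m d
      induction d generalizing m with
      | zero => intro _ _; exact le_refl _
      | succ d ihd =>
        intro hmd hm
        have h1 : PySem.Str.len (PySem.Str.join ", " (ls.take m)) ≤ PySem.Str.len (PySem.Str.join ", " (ls.take (m + 1))) := by
          have hmlt : m < ls.length := by omega
          have : ls.take (m + 1) = ls.take m ++ [ls[m]] := by
            rw [List.take_add_one, List.getElem?_eq_getElem hmlt]; rfl
          rw [this]
          -- len (join (ys ++ [z])) = len (join ys) + 2 + len z for nonempty ys
          have hys : ls.take m ≠ [] := by
            have : (ls.take m).length = m := by rw [List.length_take]; omega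
            intro h; rw [h] at this; simp at this; omega
          have grow : ∀ (ys : List String) (z : String), ys ≠ [] →
              PySem.Str.len (PySem.Str.join ", " (ys ++ [z])) =
              PySem.Str.len (PySem.Str.join ", " ys) + 2 + PySem.Str.len z := by
            intro ys z hys
            induction ys with
            | nil => exact absurd rfl hys
            | cons a ys ihy =>
              cases ys with
              | nil =>
                simp only [List.cons_append, List.nil_append]
                rw [len_join_cons a [z] (by simp), len_join_singleton, len_join_singleton]
              | cons b bs =>
                rw [List.cons_append, len_join_cons a ((b :: bs) ++ [z]) (by simp),
                    len_join_cons a (b :: bs) (by simp), ihy (by simp)]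
                ring
          rw [grow _ _ hys]
          have := str_len_nonneg ls[m]
          omega
        have h2 := ihd (m + 1) (by omega) (by omega)
        have : m + 1 + d = m + (d + 1) := by omega
        rw [this] at h2
        exact le_trans h1 h2
    have := key (i + 1) (j - i) (by omega) (by omega)
    have heq : i + 1 + (j - i) = j + 1 := by omega
    rw [heq] at this
    omega
  · omega

-- boundary predicate: c counts exactly the labels the join keeps within max_len
def pvBoundary (pref : List Int) (x : Int) (c : Nat) : Prop :=
  c ≤ pref.length ∧ (∀ i < c, pref.getD i 0 ≤ x) ∧ (c < pref.length → x < pref.getD c 0)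

theorem pvBoundary_unique (pref : List Int) (x : Int) (c c' : Nat)
    (h : pvBoundary pref x c) (h' : pvBoundary pref x c') : c = c' := by
  obtain ⟨h1, h2, h3⟩ := h
  obtain ⟨h1', h2', h3'⟩ := h'
  rcases Nat.lt_trichotomy c c' with hlt | heq | hgt
  · have := h3 (by omega); have := h2' c hlt; omega
  · exact heq
  · have := h3' (by omega); have := h2 c' hgt; omega

theorem pvBisect_boundary (ls : List String) (t x : Int) :
    ∀ (fuel lo hi : Nat), hi - lo ≤ fuel → lo ≤ hi → hi ≤ (pvPref t ls).length →
    (∀ i < lo, (pvPref t ls).getD i 0 ≤ x) →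
    (∀ i, hi ≤ i → i < (pvPref t ls).length → x < (pvPref t ls).getD i 0) →
    pvBoundary (pvPref t ls) x (pvBisect (pvPref t ls) x lo hi) := by
  intro fuel
  induction fuel with
  | zero =>
    intro lo hi hf hlh hhi hlow hhigh
    have : lo = hi := by omega
    subst this
    rw [pvBisect, if_neg (by omega)]
    exact ⟨hhi, hlow, fun h => hhigh lo (le_refl _) h⟩
  | succ fuel ih =>
    intro lo hi hf hlh hhi hlow hhigh
    have hplen := pvPref_length t ls
    by_cases hcond : lo < hi
    · rw [pvBisect, if_pos hcond]
      simp only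
      set mid := (lo + hi) / 2 with hmid
      have hm1 : lo ≤ mid := by omega
      have hm2 : mid < hi := by omega
      by_cases hx : x < (pvPref t ls).getD mid 0
      · rw [if_pos hx]
        apply ih lo mid (by omega) (by omega) (by omega) hlow
        intro i hi1 hi2
        rw [hplen] at hi2
        exact lt_of_lt_of_le hx (pvPref_mono ls t mid i hi1 hi2)
      · rw [if_neg hx]
        apply ih (mid + 1) hi (by omega) (by omega) hhi
        · intro i hi1
          rcases Nat.lt_or_ge i lo with h | h
          · exact hlow i h
          · exact le_trans (pvPref_mono ls t i mid (by omega) (by omega)) (by omega)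
        · exact hhigh
    · rw [pvBisect, if_neg hcond]
      have : lo = hi := by omega
      subst this
      exact ⟨hhi, hlow, fun h => hhigh lo (le_refl _) h⟩

theorem pvLoopA_boundary (ls : List String) (max_len : Int) (hls : ls ≠ []) :
    ∀ (fuel k : Nat), ls.length - k ≤ fuel → k ≤ ls.length →
    (∀ i < k, (pvPref 0 ls).getD i 0 ≤ max_len + 2) →
    ∃ m, pvBoundary (pvPref 0 ls) (max_len + 2) m ∧
      pvLoopA max_len (ls.take k) (ls.drop k) = ls.take m := by
  intro fuel
  induction fuel with
  | zero =>
    intro k hf hk hall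
    have : k = ls.length := by omega
    subst this
    refine ⟨ls.length, ⟨by rw [pvPref_length], by simpa [pvPref_length] using hall, by rw [pvPref_length]; omega⟩, ?_⟩
    rw [List.drop_length]
    rfl
  | succ fuel ih =>
    intro k hf hk hall
    rcases Nat.eq_or_lt_of_le hk with heq | hlt
    · subst heq
      refine ⟨ls.length, ⟨by rw [pvPref_length], hall, by rw [pvPref_length]; omega⟩, ?_⟩
      rw [List.drop_length]; rfl
    · -- step: drop k = ls[k] :: drop (k+1)
      have hdrop : ls.drop k = ls[k] :: ls.drop (k + 1) := List.drop_eq_getElem_cons hlt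
      rw [hdrop, pvLoopA]
      have hcand : PySem.Str.len (if ls.take k ≠ [] then PySem.Str.join ", " (ls.take k ++ [ls[k]]) else ls[k])
          = (pvPref 0 ls).getD k 0 - 2 := by
        rw [pvPref_getD ls 0 k hlt]
        have htk : ls.take k ++ [ls[k]] = ls.take (k + 1) := by
          rw [List.take_add_one, List.getElem?_eq_getElem hlt]; rfl
        by_cases hk0 : k = 0
        · subst hk0
          simp only [List.take_zero, ne_eq, not_true_eq_false, if_false]
          have : ls.take 1 = [ls[0]] := by
            rw [List.take_one]
            cases ls with
            | nil => exact absurd rfl hls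
            | cons a as => simp
          rw [this, len_join_singleton]
          ring
        · have htkne : ls.take k ≠ [] := by
            have : (ls.take k).length = k := by rw [List.length_take]; omega
            intro h; rw [h] at this; simp at this; omega
          rw [if_pos htkne, htk]
          ring
      simp only [hcand]
      by_cases hbr : max_len < (pvPref 0 ls).getD k 0 - 2
      · rw [if_pos hbr]
        exact ⟨k, ⟨by rw [pvPref_length]; omega, hall, fun _ => by omega⟩, rfl⟩
      · rw [if_neg hbr]
        have htk : ls.take k ++ [ls[k]] = ls.take (k + 1) := by
          rw [List.take_add_one, List.getElem?_eq_getElem hlt]; rfl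
        rw [htk]
        apply ih (k + 1) (by omega) (by omega)
        intro i hi
        rcases Nat.lt_or_ge i k with h | h
        · exact hall i h
        · have : i = k := by omega
          subst this; omega

theorem pvChosen_eq (ls : List String) (max_len : Int) (hls : ls ≠ []) :
    pvLoopA max_len [] ls =
      ls.take (pvBisect (pvPref 0 ls) (max_len + 2) 0 (pvPref 0 ls).length) := by
  obtain ⟨m, hmB, hmEq⟩ := pvLoopA_boundary ls max_len hls (ls.length) 0 (by omega) (by omega) (by omega)
  have hb := pvBisect_boundary ls 0 (max_len + 2) (pvPref 0 ls).length 0 (pvPref 0 ls).length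
    (by omega) (by omega) (le_refl _) (by omega) (by omega)
  have := pvBoundary_unique _ _ _ _ hmB hb
  subst this
  simpa using hmEq

theorem pvBisect_le (ls : List String) (max_len : Int) :
    pvBisect (pvPref 0 ls) (max_len + 2) 0 (pvPref 0 ls).length ≤ ls.length := by
  have hb := pvBisect_boundary ls 0 (max_len + 2) (pvPref 0 ls).length 0 (pvPref 0 ls).length
    (by omega) (by omega) (le_refl _) (by omega) (by omega)
  exact le_trans hb.1 (le_of_eq (pvPref_length 0 ls))

-- ===== VERDICT (by name: the statement is the Claim_ definition above) =====
theorem compact_label_text_py_spec : Claim_equal_compact_label_text_py := by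
  intro labels max_len _
  unfold Spec_compact_label_text_py compact_label_text_py compact_label_text_py_alt
  by_cases hnil : labels = []
  · rw [if_pos hnil, if_pos hnil]
  · rw [if_neg hnil, if_neg hnil]
    simp only
    rw [pvChosen_eq labels max_len hnil]
    have hlen : (labels.take (pvBisect (pvPref 0 labels) (max_len + 2) 0 (pvPref 0 labels).length)).length
        = pvBisect (pvPref 0 labels) (max_len + 2) 0 (pvPref 0 labels).length := by
      rw [List.length_take, Nat.min_eq_left (pvBisect_le labels max_len)]
    rw [hlen]
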